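-- pv_equiv track=rewrite | github.com/james-claar/Bingo-Boards | Measurement Converter.py | fix_path_looping
-- ===== SOURCE A (Python) =====
-- def fix_path_looping(path): # This function assumes that there will not be three redundant conversions in a row. If this happens, it will delete too many items.
--     redundant = []
--     for i in range(len(path)-1): # Check if we are changing back and forth on conversions, e.g. '(100 cm/1 m) * (1 m/100 cm)'
--         if path[i] == list(reversed(path[i + 1])):
--             redundant.append(i)
--             redundant.append(i+1)
--
--     redundant = list(reversed(redundant))
--     for i in sorted(redundant, reverse=True):
--         del path[i]
--
--     return path
-- ===== SOURCE B (Python) =====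
-- # One pass: collect flagged indices in a set, rebuild the list with one comprehension.
-- # (A mutates `path` in place and returns it; B leaves the argument untouched — the
-- #  equivalence claimed is about the return value only.)
-- def fix_path_looping(path):
--     flagged = set()
--     for i in range(len(path) - 1):
--         if path[i] == path[i + 1][::-1]:
--             flagged.add(i)
--             flagged.add(i + 1)
--     return [row for i, row in enumerate(path) if i not in flagged]
-- ===== Notes on version B (the rewrite author's own statement) =====
-- stated objective: idiomatic
-- what changed: Instead of A's collect/reverse/sort/destructive-del-loop on the argument, B marks redundant indices in a set during one scan and rebuilds the result with a single comprehension (no mutation of the argument, no sorting).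
-- outside the precondition, e.g. on fix_path_looping([[1], [1], [1], [2], [3]]): A returns [[3]], B returns [[2], [3]]; on fix_path_looping([[1], [1], [1]]): A raises IndexError, B returns []
import Mathlib
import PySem

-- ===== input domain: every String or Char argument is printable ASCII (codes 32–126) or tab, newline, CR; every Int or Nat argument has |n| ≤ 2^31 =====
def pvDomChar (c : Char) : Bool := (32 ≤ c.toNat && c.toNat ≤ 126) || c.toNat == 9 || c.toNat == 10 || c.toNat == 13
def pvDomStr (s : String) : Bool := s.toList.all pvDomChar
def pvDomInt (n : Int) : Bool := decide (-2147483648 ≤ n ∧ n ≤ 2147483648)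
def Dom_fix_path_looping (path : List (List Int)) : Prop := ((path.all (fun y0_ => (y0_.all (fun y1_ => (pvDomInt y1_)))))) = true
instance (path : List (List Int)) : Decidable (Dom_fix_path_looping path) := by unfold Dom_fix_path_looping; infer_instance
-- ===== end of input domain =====

-- B rebuilds the result in one pass from a set of flagged indices instead of A's
-- collect/reverse/sort/destructive-deletion loop (A mutates its argument in place and
-- returns it; the equivalence is about the return value only).

-- ===== PORT A =====
-- path[i] and path[i+1] are always in range for i in range(len(path)-1), so pyGetD [] is exact there;
-- 'del path[i]' raises IndexError out of range — Pre_ excludes those inputs; the total form leaves acc unchanged.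
def fix_path_looping (path : List (List Int)) : List (List Int) :=
  let redundant : List Int :=
    (PySem.List.pyRange 0 ((path.length : Int) - 1) 1).foldl
      (fun acc i =>
        if PySem.List.pyGetD path i [] = (PySem.List.pyGetD path (i + 1) []).reverse
        then (acc ++ [i]) ++ [i + 1] else acc) []
  let redundant2 := redundant.reverse
  (PySem.List.sorted redundant2 (fun x => x) true).foldl
    (fun acc i => ((PySem.List.pop? acc i).map Prod.snd).getD acc) path

-- ===== PORT B =====
def fix_path_looping_alt (path : List (List Int)) : List (List Int) :=
  let flagged : PySem.Set Int :=
    (PySem.List.pyRange 0 ((path.length : Int) - 1) 1).foldl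
      (fun s i =>
        if PySem.List.pyGetD path i [] =
            (PySem.List.slice? (PySem.List.pyGetD path (i + 1) []) none none (-1)).getD []
        then PySem.Set.add (PySem.Set.add s i) (i + 1) else s)
      PySem.Set.empty
  ((PySem.List.enumerate path).filter (fun p => ! PySem.Set.contains flagged p.1)).map (fun p => p.2)

-- ===== PRECONDITION & SPEC =====
-- Pre_ excludes paths with three consecutive pairwise-reversed rows: A's own comment disclaims them,
-- and on them A raises IndexError or deletes extra items (its duplicate deletion indices shift).
def Pre_fix_path_looping (path : List (List Int)) : Prop :=
  ∀ i < path.length, i + 2 < path.length →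
    ¬ (path.getD i [] = (path.getD (i + 1) []).reverse ∧
       path.getD (i + 1) [] = (path.getD (i + 2) []).reverse)
instance (path : List (List Int)) : Decidable (Pre_fix_path_looping path) := by
  unfold Pre_fix_path_looping; infer_instance
def pvWitness_fix_path_looping : List (List Int) := [[1, 2], [2, 1], [7]]
def Spec_fix_path_looping (path : List (List Int)) (out : List (List Int)) : Prop := out = fix_path_looping_alt path
instance (path : List (List Int)) (out : List (List Int)) : Decidable (Spec_fix_path_looping path out) := by unfold Spec_fix_path_looping; infer_instance

-- ===== CLAIM (what is proved, stated in full; the proofs are below) =====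
def Claim_equal_fix_path_looping : Prop := ∀ (path : List (List Int)), Dom_fix_path_looping path → Pre_fix_path_looping path → Spec_fix_path_looping path (fix_path_looping path)

-- ===== LEMMAS AND PROOFS =====

-- keep the elements of xs whose global index (counting from s) passes c
def pvKeepI (c : Int → Bool) : List (List Int) → Int → List (List Int)
  | [], _ => []
  | x :: xs, s => if c s then x :: pvKeepI c xs (s + 1) else pvKeepI c xs (s + 1)

lemma pvKeepI_congr (c c' : Int → Bool) (h : ∀ j, c j = c' j) :
    ∀ (xs : List (List Int)) (s : Int), pvKeepI c xs s = pvKeepI c' xs s := by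
  intro xs
  induction xs with
  | nil => intro s; rfl
  | cons x t ih => intro s; simp only [pvKeepI, h s, ih]

lemma pvKeepI_all (c : Int → Bool) :
    ∀ (xs : List (List Int)) (s : Int), (∀ j, s ≤ j → c j = true) → pvKeepI c xs s = xs := by
  intro xs
  induction xs with
  | nil => intro s _; rfl
  | cons x t ih =>
      intro s h
      simp only [pvKeepI, h s le_rfl, if_true]
      rw [ih (s + 1) (fun j hj => h j (by omega))]

-- erasing index k and keeping the rest = keeping everything except global index s+k
lemma pvKeepI_erase (c : Int → Bool) :
    ∀ (xs : List (List Int)) (k : Nat) (s : Int), k < xs.length → (∀ j, s + (k : Int) ≤ j → c j = true) →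
    pvKeepI c (xs.eraseIdx k) s
      = pvKeepI (fun j => !(j == s + (k : Int)) && c j) xs s := by
  intro xs
  induction xs with
  | nil => intro k s hk _; simp at hk
  | cons x t ih =>
      intro k s hk hc
      cases k with
      | zero =>
          have h1 : pvKeepI c t s = t := pvKeepI_all c t s (fun j hj => hc j (by push_cast; omega))
          have h2 : pvKeepI (fun j => !(j == s + ((0 : Nat) : Int)) && c j) t (s + 1) = t := by
            apply pvKeepI_all
            intro j hj
            have hcj : c j = true := hc j (by push_cast; omega)
            have hne : (j == s + ((0 : Nat) : Int)) = false := by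
              rw [beq_eq_false_iff_ne]
              intro h
              omega
            rw [hne, Bool.not_false, Bool.true_and]
            exact hcj
          rw [List.eraseIdx_cons_zero, h1]
          have hfalse : (!(s == s + ((0 : Nat) : Int)) && c s) = false := by
            have h0 : (s == s + ((0 : Nat) : Int)) = true := by
              rw [beq_iff_eq]
              omega
            rw [h0, Bool.not_true, Bool.false_and]
          simp only [pvKeepI, hfalse]
          rw [if_neg Bool.false_ne_true, h2]
      | succ k =>
          have hk' : k < t.length := by simpa using hk
          have hhead : (!(s == s + ((k + 1 : Nat) : Int)) && c s) = c s := by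
            have hne : (s == s + ((k + 1 : Nat) : Int)) = false := by
              rw [beq_eq_false_iff_ne]
              intro h
              omega
            rw [hne, Bool.not_false, Bool.true_and]
          have hrec : pvKeepI c (t.eraseIdx k) (s + 1)
              = pvKeepI (fun j => !(j == (s + 1) + (k : Int)) && c j) t (s + 1) :=
            ih k (s + 1) hk' (fun j hj => hc j (by push_cast at hj ⊢; omega))
          have hcongr : pvKeepI (fun j => !(j == (s + 1) + (k : Int)) && c j) t (s + 1)
              = pvKeepI (fun j => !(j == s + ((k + 1 : Nat) : Int)) && c j) t (s + 1) := by
            apply pvKeepI_congr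
            intro j
            have : (s + 1) + (k : Int) = s + ((k + 1 : Nat) : Int) := by push_cast; ring
            rw [this]
          rw [List.eraseIdx_cons_succ]
          simp only [pvKeepI, hhead]
          rw [hrec, hcongr]

-- A's descending deletion loop keeps exactly the indices not listed
lemma pv_delete_fold (ds : List Int) :
    ∀ (xs : List (List Int)), ds.Pairwise (· > ·) →
    (∀ d ∈ ds, 0 ≤ d ∧ d < (xs.length : Int)) →
    ds.foldl (fun acc i => ((PySem.List.pop? acc i).map Prod.snd).getD acc) xs
      = pvKeepI (fun j => ! ds.contains j) xs 0 := by
  induction ds with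
  | nil =>
      intro xs _ _
      exact (pvKeepI_all _ xs 0 (by intro j _; simp)).symm
  | cons d t ih =>
      intro xs hp hb
      obtain ⟨hd0, hdlen⟩ := hb d (List.mem_cons_self ..)
      obtain ⟨k, rfl⟩ : ∃ k : Nat, d = (k : Int) := ⟨d.toNat, by omega⟩
      have hk : k < xs.length := by exact_mod_cast hdlen
      have hstep : ((PySem.List.pop? xs (k : Int)).map Prod.snd).getD xs = xs.eraseIdx k := by
        rw [PySem.List.pop?_natCast xs k hk]; rfl
      have htlt : ∀ e ∈ t, e < (k : Int) := (List.pairwise_cons.mp hp).1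
      have hbt : ∀ e ∈ t, 0 ≤ e ∧ e < ((xs.eraseIdx k).length : Int) := by
        intro e he
        obtain ⟨h1, _⟩ := hb e (List.mem_cons_of_mem _ he)
        have h3 := htlt e he
        rw [List.length_eraseIdx_of_lt hk]
        refine ⟨h1, by push_cast; omega⟩
      rw [List.foldl_cons, hstep, ih (xs.eraseIdx k) (List.pairwise_cons.mp hp).2 hbt,
        pvKeepI_erase (fun j => ! t.contains j) xs k 0 hk (by
          intro j hj
          have hnot : j ∉ t := fun hmem => by have := htlt j hmem; omega
          simp [hnot])]
      apply pvKeepI_congr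
      intro j
      have h0 : (0 : Int) + (k : Int) = (k : Int) := by ring
      rw [h0, List.contains_cons, Bool.not_or]

-- A's flag-collecting loop
lemma pvA_loop (path : List (List Int)) (l : List Int) :
    ∀ acc : List Int,
      l.foldl (fun acc i =>
        if PySem.List.pyGetD path i ([] : List Int) = (PySem.List.pyGetD path (i + 1) []).reverse
        then (acc ++ [i]) ++ [i + 1] else acc) acc
      = acc ++ (l.filter (fun i =>
          decide (PySem.List.pyGetD path i ([] : List Int) = (PySem.List.pyGetD path (i + 1) []).reverse))).flatMap
            (fun i => [i, i + 1]) := by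
  induction l with
  | nil => intro acc; simp
  | cons x t ih =>
      intro acc
      rw [List.foldl_cons]
      by_cases h : PySem.List.pyGetD path x ([] : List Int) = (PySem.List.pyGetD path (x + 1) []).reverse
      · rw [if_pos h, ih, List.filter_cons_of_pos (by simp [h])]
        simp
      · rw [if_neg h, ih, List.filter_cons_of_neg (by simp [h])]

-- B's flag-collecting loop, by membership
lemma pvB_loop (path : List (List Int)) (l : List Int) :
    ∀ (s : PySem.Set Int) (j : Int),
      (j ∈ l.foldl (fun s i =>
        if PySem.List.pyGetD path i ([] : List Int) = (PySem.List.pyGetD path (i + 1) []).reverse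
        then PySem.Set.add (PySem.Set.add s i) (i + 1) else s) s)
      ↔ j ∈ s ∨ ∃ i ∈ l,
          (PySem.List.pyGetD path i ([] : List Int) = (PySem.List.pyGetD path (i + 1) []).reverse)
            ∧ (j = i ∨ j = i + 1) := by
  induction l with
  | nil => intro s j; simp
  | cons x t ih =>
      intro s j
      by_cases h : PySem.List.pyGetD path x ([] : List Int) = (PySem.List.pyGetD path (x + 1) []).reverse
      · simp only [List.foldl_cons, if_pos h, ih, PySem.Set.mem_add]
        constructor
        · rintro (((hs | h1) | h2) | ⟨i, hi, hp, hj⟩)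
          · exact Or.inl hs
          · exact Or.inr ⟨x, by simp, h, Or.inl h1⟩
          · exact Or.inr ⟨x, by simp, h, Or.inr h2⟩
          · exact Or.inr ⟨i, by simp [hi], hp, hj⟩
        · rintro (hs | ⟨i, hi, hp, hj⟩)
          · exact Or.inl (Or.inl (Or.inl hs))
          · rcases List.mem_cons.mp hi with rfl | hit
            · rcases hj with rfl | rfl
              · exact Or.inl (Or.inl (Or.inr rfl))
              · exact Or.inl (Or.inr rfl)
            · exact Or.inr ⟨i, hit, hp, hj⟩
      · simp only [List.foldl_cons, if_neg h, ih]
        constructor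
        · rintro (hs | ⟨i, hi, hp, hj⟩)
          · exact Or.inl hs
          · exact Or.inr ⟨i, by simp [hi], hp, hj⟩
        · rintro (hs | ⟨i, hi, hp, hj⟩)
          · exact Or.inl hs
          · rcases List.mem_cons.mp hi with rfl | hit
            · exact absurd hp h
            · exact Or.inr ⟨i, hit, hp, hj⟩

lemma pv_pairwise_blocks (l : List Int) (hl : l.Pairwise (· < ·)) (hsep : ∀ i ∈ l, i + 1 ∉ l) :
    (l.flatMap (fun i => [i, i + 1])).Pairwise (· < ·) := by
  induction l with
  | nil => simp
  | cons x t ih =>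
      have hx1 : x + 1 ∉ t := fun h => hsep x (by simp) (List.mem_cons_of_mem _ h)
      have hxt : ∀ j ∈ t, x < j := (List.pairwise_cons.mp hl).1
      have ht : t.Pairwise (· < ·) := (List.pairwise_cons.mp hl).2
      have hsept : ∀ i ∈ t, i + 1 ∉ t :=
        fun i hi h => hsep i (List.mem_cons_of_mem _ hi) (List.mem_cons_of_mem _ h)
      have hbig : ∀ y ∈ t.flatMap (fun i => [i, i + 1]), x + 1 < y := by
        intro y hy
        rcases List.mem_flatMap.mp hy with ⟨i, hit, hyi⟩
        have h1 : x < i := hxt i hit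
        have h2 : i ≠ x + 1 := fun h => hx1 (h ▸ hit)
        simp at hyi
        omega
      rw [List.flatMap_cons]
      refine (List.pairwise_append).mpr ⟨by simp, ih ht hsept, ?_⟩
      intro a ha b hb
      have hblt := hbig b hb
      simp at ha
      omega

-- B's enumerate/filter/map pipeline is pvKeepI
lemma pv_enum_filter_gen (c : Int → Bool) :
    ∀ (xs : List (List Int)) (s : Int),
      ((PySem.List.enumerate xs s).filter (fun p => c p.1)).map (fun p => p.2)
        = pvKeepI c xs s := by
  intro xs
  induction xs with
  | nil => intro s; rfl
  | cons x t ih =>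
      intro s
      rw [PySem.List.enumerate_cons, List.filter_cons]
      cases h : c s with
      | false =>
          rw [if_neg (by simp [h]), ih]
          simp only [pvKeepI, h]
          rw [if_neg Bool.false_ne_true]
      | true =>
          rw [if_pos (by simp [h]), List.map_cons, ih]
          simp only [pvKeepI, h]
          exact (if_pos (by trivial)).symm

lemma pv_enum_filter (F : PySem.Set Int) :
    ∀ (xs : List (List Int)) (s : Int),
      ((PySem.List.enumerate xs s).filter (fun p => ! PySem.Set.contains F p.1)).map (fun p => p.2)
        = pvKeepI (fun j => ! PySem.Set.contains F j) xs s :=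
  fun xs s => pv_enum_filter_gen (fun j => ! PySem.Set.contains F j) xs s

-- ===== VERDICT (by name: the statement is the Claim_ definition above) =====
theorem fix_path_looping_spec : Claim_equal_fix_path_looping := by
  intro path _hdom hpre
  unfold Spec_fix_path_looping
  simp only [fix_path_looping, fix_path_looping_alt,
    PySem.List.slice?_none_none_neg_one, Option.getD_some]
  rw [pvA_loop path _ []]
  simp only [List.nil_append]
  set L : List Int := (PySem.List.pyRange 0 ((path.length : Int) - 1) 1).filter (fun i =>
      decide (PySem.List.pyGetD path i ([] : List Int) = (PySem.List.pyGetD path (i + 1) []).reverse))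
    with hL
  set red : List Int := L.flatMap (fun i => [i, i + 1]) with hred
  set F : PySem.Set Int := (PySem.List.pyRange 0 ((path.length : Int) - 1) 1).foldl (fun s i =>
      if PySem.List.pyGetD path i ([] : List Int) = (PySem.List.pyGetD path (i + 1) []).reverse
      then PySem.Set.add (PySem.Set.add s i) (i + 1) else s) PySem.Set.empty
    with hF
  have hmemL : ∀ i : Int, i ∈ L ↔ (0 ≤ i ∧ i < (path.length : Int) - 1) ∧
      PySem.List.pyGetD path i ([] : List Int) = (PySem.List.pyGetD path (i + 1) []).reverse := by
    intro i
    rw [hL]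
    simp [List.mem_filter, PySem.List.mem_pyRange_one]
  have hLpw : L.Pairwise (· < ·) := List.Pairwise.filter _ (PySem.List.pairwise_lt_pyRange_one 0 _)
  have hsep : ∀ i ∈ L, i + 1 ∉ L := by
    intro i hi hi1
    obtain ⟨⟨hi0, hin⟩, hieq⟩ := (hmemL i).mp hi
    obtain ⟨⟨_, hi1n⟩, hi1eq⟩ := (hmemL (i + 1)).mp hi1
    obtain ⟨j, rfl⟩ : ∃ j : Nat, i = (j : Int) := ⟨i.toNat, by omega⟩
    have hj2 : j + 2 < path.length := by push_cast at hi1n; omega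
    have hj0 : j < path.length := by omega
    apply hpre j hj0 hj2
    have e1 : PySem.List.pyGetD path ((j : Nat) : Int) ([] : List Int) = path.getD j [] :=
      PySem.List.pyGetD_natCast path j []
    have e2 : PySem.List.pyGetD path (((j : Nat) : Int) + 1) ([] : List Int) = path.getD (j + 1) [] := by
      rw [show (((j : Nat) : Int) + 1) = ((j + 1 : Nat) : Int) by push_cast; ring]
      exact PySem.List.pyGetD_natCast path (j + 1) []
    have e3 : PySem.List.pyGetD path (((j : Nat) : Int) + 1 + 1) ([] : List Int) = path.getD (j + 2) [] := by
      rw [show (((j : Nat) : Int) + 1 + 1) = ((j + 2 : Nat) : Int) by push_cast; ring]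
      exact PySem.List.pyGetD_natCast path (j + 2) []
    constructor
    · rw [← e1, ← e2]; exact hieq
    · rw [← e2, ← e3]; exact hi1eq
  have hredpw : red.Pairwise (· < ·) := pv_pairwise_blocks L hLpw hsep
  have hrevpw : red.reverse.Pairwise (· > ·) := List.pairwise_reverse.mpr hredpw
  have hsorted : PySem.List.sorted red.reverse (fun x => x) true = red.reverse :=
    PySem.List.sorted_rev_eq_self_of_pairwise _ _ (hrevpw.imp (fun h => le_of_lt h))
  rw [hsorted]
  have hbounds : ∀ e ∈ red.reverse, 0 ≤ e ∧ e < (path.length : Int) := by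
    intro e he
    rw [List.mem_reverse, hred] at he
    rcases List.mem_flatMap.mp he with ⟨i, hiL, hei⟩
    obtain ⟨⟨h0, h1⟩, _⟩ := (hmemL i).mp hiL
    simp at hei
    rcases hei with rfl | rfl <;> omega
  rw [pv_delete_fold red.reverse path hrevpw hbounds, pv_enum_filter F path 0]
  apply pvKeepI_congr
  intro j
  have hmemF : j ∈ F ↔ ∃ i ∈ PySem.List.pyRange 0 ((path.length : Int) - 1) 1,
      (PySem.List.pyGetD path i ([] : List Int) = (PySem.List.pyGetD path (i + 1) []).reverse)
        ∧ (j = i ∨ j = i + 1) := by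
    rw [hF]
    have h := pvB_loop path (PySem.List.pyRange 0 ((path.length : Int) - 1) 1) PySem.Set.empty j
    simpa [PySem.Set.empty] using h
  have hiff : j ∈ red.reverse ↔ j ∈ F := by
    rw [List.mem_reverse, hred, hmemF]
    simp only [List.mem_flatMap]
    constructor
    · rintro ⟨i, hiL, hji⟩
      obtain ⟨⟨h0, h1⟩, hcond⟩ := (hmemL i).mp hiL
      exact ⟨i, PySem.List.mem_pyRange_one.mpr ⟨h0, h1⟩, hcond, by simpa using hji⟩
    · rintro ⟨i, hiR, hcond, hji⟩
      have hb := PySem.List.mem_pyRange_one.mp hiR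
      exact ⟨i, (hmemL i).mpr ⟨hb, hcond⟩, by simpa using hji⟩
  by_cases hj : j ∈ red.reverse
  · have hj2 := hiff.mp hj
    simp [PySem.Set.contains, hj, hj2]
  · have hj2 : j ∉ F := fun h => hj (hiff.mpr h)
    simp [PySem.Set.contains, hj, hj2]
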